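-- pv_equiv track=rewrite | github.com/QwQ-maker/4box | NewWork/main_enhanced.py | algebraic_degree_sbox
-- ===== SOURCE A (Python) =====
-- def calc_hamming_weight(val):
--     """计算汉明重量"""
--     count = 0
--     while val:
--         count += val & 1
--         val >>= 1
--     return count
--
-- def sbox_to_component_truth_tables(sbox, n_bits):
--     """拆分S盒为各个分量的真值表"""
--     size = 1 << n_bits
--     components = []
--     for bit in range(n_bits):
--         tt = [(sbox[x] >> (n_bits - 1 - bit)) & 1 for x in range(size)]
--         components.append(tt)
--     return components
--
-- def mobius_transform(truth_table, n_bits):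
--     """Möbius变换求ANF系数"""
--     size = 1 << n_bits
--     anf = truth_table[:]
--     for i in range(n_bits):
--         step = 1 << i
--         for j in range(size):
--             if j & step:
--                 anf[j] ^= anf[j ^ step]
--     return anf
--
-- def algebraic_degree_sbox(sbox, n_bits):
--     """S盒代数次数"""
--     components = sbox_to_component_truth_tables(sbox, n_bits)
--     max_deg = 0
--     for comp in components:
--         anf = mobius_transform(comp, n_bits)
--         deg = max((calc_hamming_weight(k) for k in range(1 << n_bits) if anf[k] == 1), default=0)
--         max_deg = max(max_deg, deg)
--     return max_deg
-- ===== SOURCE B (Python) =====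
-- def algebraic_degree_sbox(sbox, n_bits):
--     """S-box algebraic degree: one packed Mobius transform over n-bit words
--     instead of n separate single-bit transforms."""
--     size = 1 << n_bits
--     mask = size - 1
--     anf = [sbox[x] & mask for x in range(size)]
--     for i in range(n_bits):
--         step = 1 << i
--         for j in range(size):
--             if j & step:
--                 anf[j] ^= anf[j ^ step]
--     deg = 0
--     for k in range(size):
--         if anf[k]:
--             w = sum((k >> i) & 1 for i in range(n_bits))
--             if w > deg:
--                 deg = w
--     return deg
-- ===== Notes on version B (the rewrite author's own statement) =====
-- stated objective: faster
-- what changed: B keeps the S-box as one array of n-bit integers and runs a single Moebius (butterfly) transform with integer XOR, computing all n component ANFs in parallel, then reads the degree off in one union scan (max popcount of k with anf[k] != 0), instead of A's split into n 0/1 truth tables, n separate transforms and a per-component max.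
-- outside the precondition, e.g. on algebraic_degree_sbox([], 0): A returns 0, B raises IndexError
import Mathlib
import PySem

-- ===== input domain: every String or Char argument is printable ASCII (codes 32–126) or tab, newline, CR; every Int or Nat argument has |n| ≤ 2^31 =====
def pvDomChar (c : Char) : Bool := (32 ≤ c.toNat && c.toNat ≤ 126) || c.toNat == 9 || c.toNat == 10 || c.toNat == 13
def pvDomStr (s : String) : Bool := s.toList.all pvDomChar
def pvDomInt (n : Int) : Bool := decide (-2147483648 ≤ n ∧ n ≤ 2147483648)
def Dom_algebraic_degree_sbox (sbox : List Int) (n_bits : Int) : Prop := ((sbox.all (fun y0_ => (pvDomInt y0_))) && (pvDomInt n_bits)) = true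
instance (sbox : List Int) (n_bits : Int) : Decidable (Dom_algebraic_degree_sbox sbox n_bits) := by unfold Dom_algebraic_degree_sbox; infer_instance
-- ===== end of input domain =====

-- B replaces A's n single-bit truth tables + n Möbius transforms + per-component max by ONE packed
-- Möbius transform over n-bit words and one union scan (faster by a factor of n_bits).

-- ===== PORT A =====

-- while val: count += val & 1; val >>= 1   (exact for 0 ≤ val, the only values A feeds it;
-- Python diverges for val < 0, so the guard `val = 0` only makes the same computation total)
def pvHWloop (val : Nat) (count : Int) : Int :=
  if _h : val = 0 then count else pvHWloop (val >>> 1) (count + (↑(val &&& 1) : Int))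
termination_by val
decreasing_by simp [Nat.shiftRight_one]; omega

def calc_hamming_weight (val : Int) : Int := pvHWloop val.toNat 0

-- the double loop `for i in range(n_bits): step = 1 << i; for j in range(size): if j & step:
-- anf[j] ^= anf[j ^ step]` — this exact text occurs in A (inside mobius_transform) and in B
def pvButterfly (n_bits size : Int) (anf0 : List Int) : List Int :=
  (PySem.List.pyRange 0 n_bits 1).foldl (fun anf i =>
    let step : Int := 1 <<< i.toNat
    (PySem.List.pyRange 0 size 1).foldl (fun a j =>
      if PySem.Int.band j step ≠ 0 then
        PySem.List.pySetD a j
          (PySem.Int.bxor (PySem.List.pyGetD a j 0) (PySem.List.pyGetD a (PySem.Int.bxor j step) 0))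
      else a) anf) anf0

def sbox_to_component_truth_tables (sbox : List Int) (n_bits : Int) : List (List Int) :=
  let size : Int := 1 <<< n_bits.toNat   -- 1 << n_bits  (Pre_ gives 0 ≤ n_bits)
  (PySem.List.pyRange 0 n_bits 1).foldl (fun components bit =>
    components ++ [(PySem.List.pyRange 0 size 1).map (fun x =>
      PySem.Int.band ((PySem.List.pyGetD sbox x 0) >>> (n_bits - 1 - bit).toNat) 1)]) []

def mobius_transform (truth_table : List Int) (n_bits : Int) : List Int :=
  -- anf = truth_table[:] then the double loop
  pvButterfly n_bits (1 <<< n_bits.toNat) truth_table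

def algebraic_degree_sbox (sbox : List Int) (n_bits : Int) : Int :=
  let components := sbox_to_component_truth_tables sbox n_bits
  let size : Int := 1 <<< n_bits.toNat
  components.foldl (fun max_deg comp =>
    let anf := mobius_transform comp n_bits
    let deg := PySem.List.maxD
      (((PySem.List.pyRange 0 size 1).filter (fun k => PySem.List.pyGetD anf k 0 == 1)).map
        (fun k => calc_hamming_weight k)) (fun d => d) 0
    max max_deg deg) 0

-- ===== PORT B =====

def algebraic_degree_sbox_alt (sbox : List Int) (n_bits : Int) : Int :=
  let size : Int := 1 <<< n_bits.toNat
  let mask : Int := size - 1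
  let anf := pvButterfly n_bits size
    ((PySem.List.pyRange 0 size 1).map (fun x => PySem.Int.band (PySem.List.pyGetD sbox x 0) mask))
  (PySem.List.pyRange 0 size 1).foldl (fun deg k =>
    if PySem.List.pyGetD anf k 0 ≠ 0 then
      let w := ((PySem.List.pyRange 0 n_bits 1).map
        (fun i => PySem.Int.band (k >>> i.toNat) 1)).sum
      if w > deg then w else deg
    else deg) 0

-- ===== PRECONDITION & SPEC =====
-- A raises for n_bits < 0 (negative shift) and for 2^n_bits > len(sbox) with n_bits ≥ 1 (IndexError).
-- Pre_ also excludes the single corner (empty sbox, n_bits = 0), where A returns 0 without ever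
-- touching sbox but B (which reads sbox[0] & 0) naturally raises IndexError.
def Pre_algebraic_degree_sbox (sbox : List Int) (n_bits : Int) : Prop :=
  0 ≤ n_bits ∧ 2 ^ n_bits.toNat ≤ sbox.length
instance (sbox : List Int) (n_bits : Int) : Decidable (Pre_algebraic_degree_sbox sbox n_bits) := by
  unfold Pre_algebraic_degree_sbox; infer_instance

def pvWitness_algebraic_degree_sbox : List Int × Int := ([3, 0, 1, 2], 2)

def Spec_algebraic_degree_sbox (sbox : List Int) (n_bits : Int) (out : Int) : Prop := out = algebraic_degree_sbox_alt sbox n_bits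
instance (sbox : List Int) (n_bits : Int) (out : Int) : Decidable (Spec_algebraic_degree_sbox sbox n_bits out) := by unfold Spec_algebraic_degree_sbox; infer_instance

-- ===== CLAIM (what is proved, stated in full; the proofs are below) =====
def Claim_equal_algebraic_degree_sbox : Prop := ∀ (sbox : List Int) (n_bits : Int), Dom_algebraic_degree_sbox sbox n_bits → Pre_algebraic_degree_sbox sbox n_bits → Spec_algebraic_degree_sbox sbox n_bits (algebraic_degree_sbox sbox n_bits)

-- ===== LEMMAS AND PROOFS =====

-- Nat-level mirror of one butterfly update
def pvNatStep (s : Nat) (a : List Nat) (j : Nat) : List Nat :=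
  if j &&& s ≠ 0 then a.set j ((a.getD j 0) ^^^ (a.getD (j ^^^ s) 0)) else a

-- Nat-level mirror of pvButterfly
def pvNatXform (n N : Nat) (L : List Nat) : List Nat :=
  (List.range n).foldl (fun anf i => (List.range N).foldl (pvNatStep (1 <<< i)) anf) L

-- the p-th bit of a word, as a 0/1 Nat
def pvExtract (p : Nat) (v : Nat) : Nat := cond (v.testBit p) 1 0

-- B's initial packed entry: sbox[x] & (2^n - 1), as a Nat
def pvPack (n : Nat) (v : Int) : Nat := (PySem.Int.band v ((2 : Int) ^ n - 1)).toNat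

-- hamming weight as Int
def pvHw (k : Nat) : Int := ((PySem.Int.bitCount (k : Int) : Nat) : Int)

-- the packed initial list and its transform
def pvP (sbox : List Int) (n : Nat) : List Nat :=
  (List.range (2 ^ n)).map (fun x => pvPack n (sbox.getD x 0))
def pvAN (sbox : List Int) (n : Nat) : List Nat := pvNatXform n (2 ^ n) (pvP sbox n)

theorem pvHWloop_eq (val : Nat) (count : Int) :
    pvHWloop val count = count + ↑(PySem.Int.bitCount (↑val : Int)) := by
  fun_induction pvHWloop with
  | case1 count =>
      simp
  | case2 val count h ih =>
      rw [ih]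
      have h2 : PySem.Int.bitCount (↑val : Int) = val % 2 + PySem.Int.bitCount ↑(val / 2) :=
        PySem.Int.bitCount_natCast (by omega)
      rw [Nat.shiftRight_one, h2, Nat.and_one_is_mod]
      push_cast
      ring

theorem calc_hamming_weight_natCast (k : Nat) :
    calc_hamming_weight (↑k : Int) = pvHw k := by
  show pvHWloop (↑k : Int).toNat 0 = _
  rw [Int.toNat_natCast, pvHWloop_eq, zero_add]
  rfl

-- complement-within-n-bits flips every bit below n
theorem pvComplBit (p : Nat) : ∀ (n m : Nat), p < n →
    Nat.testBit (2 ^ n - 1 - m % 2 ^ n) p = ! Nat.testBit m p := by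
  induction p with
  | zero =>
      intro n m hn
      have h2 : 2 ^ n = 2 * 2 ^ (n - 1) := by
        rw [← pow_succ']; congr 1; omega
      have hr : m % 2 ^ n % 2 = m % 2 := Nat.mod_mod_of_dvd m ⟨2 ^ (n-1), h2⟩
      have hlt : m % 2 ^ n < 2 ^ n := Nat.mod_lt _ (by positivity)
      rw [Nat.testBit_zero, Nat.testBit_zero]
      have hpar : (2 ^ n - 1 - m % 2 ^ n) % 2 = 1 - m % 2 := by omega
      rw [hpar]
      rcases Nat.mod_two_eq_zero_or_one m with h | h <;> rw [h] <;> decide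
  | succ p ih =>
      intro n m hn
      have h2 : 2 ^ n = 2 * 2 ^ (n - 1) := by
        rw [← pow_succ']; congr 1; omega
      set K := 2 ^ (n - 1) with hK
      have hKpos : 0 < K := by positivity
      obtain ⟨q, r, hm, hr⟩ : ∃ q r, m = 2 * K * q + r ∧ r < 2 * K :=
        ⟨m / (2 * K), m % (2 * K), (Nat.div_add_mod m (2 * K)).symm, Nat.mod_lt m (by omega)⟩
      have hrm : m % 2 ^ n = r := by
        rw [h2, hm, Nat.mul_add_mod]
        exact Nat.mod_eq_of_lt hr
      have hm' : m = 2 * (K * q) + r := by rw [hm]; ring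
      have hm2 : m / 2 = K * q + r / 2 := by omega
      have hm2K : m / 2 % K = r / 2 := by
        rw [hm2, Nat.add_comm, Nat.add_mul_mod_self_left]
        exact Nat.mod_eq_of_lt (by omega)
      rw [Nat.testBit_succ, Nat.testBit_succ, hrm, h2]
      have hgoal : (2 * K - 1 - r) / 2 = K - 1 - r / 2 := by omega
      rw [hgoal, ← hm2K, hK]
      exact ih (n - 1) (m / 2) (by omega)

theorem pvCastPow (n : Nat) : ((2 : Int) ^ n - 1) = ((2 ^ n - 1 : Nat) : Int) := by
  push_cast [Nat.one_le_two_pow]; ring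

theorem pvPack_ofNat (n : Nat) (m : Nat) :
    pvPack n (Int.ofNat m) = m % 2 ^ n := by
  unfold pvPack
  rw [pvCastPow]
  rw [show ((Int.ofNat m) = ((m : Nat) : Int)) from rfl, PySem.Int.band_natCast]
  rw [Int.toNat_natCast, Nat.and_two_pow_sub_one_eq_mod]

theorem pvPack_negSucc (n : Nat) (m : Nat) :
    pvPack n (Int.negSucc m) = 2 ^ n - 1 - m % 2 ^ n := by
  unfold pvPack
  rw [pvCastPow]
  rw [PySem.Int.band.eq_1]
  rw [if_neg (by exact of_decide_eq_false rfl), if_pos (by positivity)]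
  have h1 : (-Int.negSucc m - 1) = ((m : Nat) : Int) := by
    rw [Int.neg_negSucc]; push_cast; ring
  rw [h1, Int.toNat_natCast, Int.toNat_natCast, Nat.and_comm, Nat.and_two_pow_sub_one_eq_mod]
  simp

theorem pvPack_lt (n : Nat) (v : Int) : pvPack n v < 2 ^ n := by
  have h1 : 0 < 2 ^ n := Nat.two_pow_pos n
  cases v with
  | ofNat m => rw [pvPack_ofNat]; exact Nat.mod_lt _ h1
  | negSucc m => rw [pvPack_negSucc]; omega

theorem pvPack_cast (n : Nat) (v : Int) :
    PySem.Int.band v ((2 : Int) ^ n - 1) = ((pvPack n v : Nat) : Int) := by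
  unfold pvPack
  exact (Int.toNat_of_nonneg (by
    rw [pvCastPow, PySem.Int.band_comm]
    exact PySem.Int.band_nonneg_of_nonneg_left v (Int.natCast_nonneg _))).symm

theorem pvExtract_xor (p x y : Nat) : pvExtract p (x ^^^ y) = pvExtract p x ^^^ pvExtract p y := by
  unfold pvExtract
  rw [Nat.testBit_xor]
  cases x.testBit p <;> cases y.testBit p <;> rfl

theorem pvExtract_zero (p : Nat) : pvExtract p 0 = 0 := by
  unfold pvExtract
  rw [Nat.zero_testBit]
  rfl

theorem pvExtract_eq_one_iff (p v : Nat) : pvExtract p v = 1 ↔ v.testBit p = true := by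
  unfold pvExtract
  cases v.testBit p <;> simp

theorem pvBitVal (m p : Nat) : (m >>> p) &&& 1 = cond (m.testBit p) 1 0 := by
  rw [Nat.and_one_is_mod, Nat.testBit_eq_decide_div_mod_eq, Nat.shiftRight_eq_div_pow]
  rcases Nat.mod_two_eq_zero_or_one (m / 2 ^ p) with h | h <;> rw [h] <;> simp

-- KEY BIT FACT: the truth-table bit A extracts equals bit p of B's packed word
theorem pvBand_shift_one (v : Int) (p n : Nat) (hp : p < n) :
    PySem.Int.band (v >>> p) 1 = ((pvExtract p (pvPack n v) : Nat) : Int) := by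
  cases v with
  | ofNat m =>
      rw [show ((Int.ofNat m) >>> p = ((m >>> p : Nat) : Int)) from rfl,
        show ((1 : Int) = ((1 : Nat) : Int)) from rfl, PySem.Int.band_natCast]
      rw [pvPack_ofNat]
      unfold pvExtract
      rw [Nat.testBit_mod_two_pow]
      simp only [hp, decide_true, Bool.true_and]
      rw [pvBitVal]
  | negSucc m =>
      rw [show ((Int.negSucc m) >>> p = Int.negSucc (m >>> p)) from rfl]
      rw [PySem.Int.band.eq_1]
      rw [if_neg (by exact of_decide_eq_false rfl), if_pos (by norm_num)]
      have h1 : (-Int.negSucc (m >>> p) - 1) = ((m >>> p : Nat) : Int) := by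
        rw [Int.neg_negSucc]; push_cast; ring
      rw [h1, Int.toNat_natCast]
      rw [pvPack_negSucc]
      unfold pvExtract
      rw [show ((1:Int).toNat = 1) from rfl]
      have hc : (2 ^ n - 1 - m % 2 ^ n).testBit p = ! m.testBit p := pvComplBit p n m hp
      rw [hc]
      rw [Nat.and_comm, pvBitVal]
      rcases hb : m.testBit p <;> simp

-- generic: a fold whose step commutes with `map f` commutes with `map f`
theorem pvFoldMap {α γ β : Type} {g : List γ → β → List γ} {h : List α → β → List α} {f : α → γ}
    (hc : ∀ a j, g (a.map f) j = (h a j).map f) :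
    ∀ (idx : List β) (L : List α), idx.foldl g (L.map f) = (idx.foldl h L).map f := by
  intro idx
  induction idx with
  | nil => intro L; rfl
  | cons j t ih => intro L; simp only [List.foldl_cons, hc, ih]

theorem pvGetDCast (M : List Nat) (k : Nat) :
    PySem.List.pyGetD (M.map (fun v : Nat => (v : Int))) ((k : Nat) : Int) 0 = ((M.getD k 0 : Nat) : Int) := by
  rw [PySem.List.pyGetD_natCast]
  exact List.getD_map M 0 _

theorem pvStepCast (s : Nat) (L : List Nat) (j : Nat) :
    (fun (a : List Int) (ji : Int) =>
      if PySem.Int.band ji ((1 <<< s : Nat) : Int) ≠ 0 then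
        PySem.List.pySetD a ji
          (PySem.Int.bxor (PySem.List.pyGetD a ji 0) (PySem.List.pyGetD a (PySem.Int.bxor ji ((1 <<< s : Nat) : Int)) 0))
      else a) (L.map (fun v : Nat => (v : Int))) ((j : Nat) : Int)
    = (pvNatStep (1 <<< s) L j).map (fun v : Nat => (v : Int)) := by
  show (if PySem.Int.band ↑j ((1 <<< s : Nat) : Int) ≠ 0 then _ else _) = _
  rw [PySem.Int.band_natCast]
  unfold pvNatStep
  by_cases hb : j &&& (1 <<< s) = 0
  · have hbi : ¬ (((j &&& (1 <<< s) : Nat) : Int) ≠ 0) := by simpa using hb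
    rw [if_neg hbi, if_neg (by simpa using hb)]
  · rw [if_pos (by exact_mod_cast hb), if_pos hb]
    rw [PySem.List.pySetD_natCast, pvGetDCast, PySem.Int.bxor_natCast, pvGetDCast, PySem.Int.bxor_natCast]
    conv_rhs => rw [List.map_set]

-- the Int butterfly on a cast list is the Nat butterfly
theorem pvButterfly_natCast (n N : Nat) (L : List Nat) :
    pvButterfly ((n : Nat) : Int) ((N : Nat) : Int) (L.map (fun v : Nat => (v : Int))) =
      (pvNatXform n N L).map (fun v : Nat => (v : Int)) := by
  unfold pvButterfly pvNatXform
  simp only [PySem.List.pyRange_zero_natCast]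
  simp only [List.foldl_map]
  simp only [Int.toNat_natCast]
  refine pvFoldMap ?_ (List.range n) L
  intro a i
  exact pvFoldMap (fun a' j => pvStepCast i a' j) (List.range N) a

-- bit extraction commutes with the butterfly
theorem pvNatXform_map (n N : Nat) (f : Nat → Nat)
    (hf : ∀ x y, f (x ^^^ y) = f x ^^^ f y) (L : List Nat) :
    pvNatXform n N (L.map f) = (pvNatXform n N L).map f := by
  have hf0 : f 0 = 0 := by simpa using hf 0 0
  unfold pvNatXform
  refine pvFoldMap ?_ (List.range n) L
  intro a i
  refine pvFoldMap ?_ (List.range N) a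
  intro a' j
  unfold pvNatStep
  have hg : ∀ (M : List Nat) (k : Nat), (M.map f).getD k 0 = f (M.getD k 0) := by
    intro M k
    conv_lhs => rw [← hf0]
    rw [List.getD_map]
  by_cases hb : j &&& (1 <<< i) = 0
  · rw [if_neg (by simpa using hb), if_neg (by simpa using hb)]
  · rw [if_pos (by simpa using hb), if_pos (by simpa using hb), hg, hg, ← hf, ← List.map_set]

theorem pvFoldPres {α β : Type} (P : List α → Prop) {g : List α → β → List α}
    (h : ∀ a j, P a → P (g a j)) : ∀ (idx : List β) (L : List α), P L → P (idx.foldl g L) := by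
  intro idx
  induction idx with
  | nil => intro L hL; exact hL
  | cons j t ih => intro L hL; exact ih _ (h L j hL)

theorem pvNatXform_lt (n N B : Nat) (L : List Nat) (h : ∀ v ∈ L, v < 2 ^ B) :
    ∀ v ∈ pvNatXform n N L, v < 2 ^ B := by
  unfold pvNatXform
  refine pvFoldPres (fun M => ∀ v ∈ M, v < 2 ^ B) ?_ (List.range n) L h
  intro a i ha
  refine pvFoldPres (fun M => ∀ v ∈ M, v < 2 ^ B) ?_ (List.range N) a ha
  intro a' j ha' v hv
  unfold pvNatStep at hv
  by_cases hb : j &&& (1 <<< i) = 0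
  · rw [if_neg (by simpa using hb)] at hv
    exact ha' v hv
  · rw [if_pos (by simpa using hb)] at hv
    rcases List.mem_or_eq_of_mem_set hv with h1 | h1
    · exact ha' v h1
    · subst h1
      have hx : ∀ k, a'.getD k 0 < 2 ^ B := by
        intro k
        rcases Nat.lt_or_ge k a'.length with hk | hk
        · rw [List.getD_eq_getElem _ _ hk]
          exact ha' _ (List.getElem_mem hk)
        · rw [List.getD_eq_default _ _ hk]
          exact Nat.two_pow_pos B
      exact Nat.xor_lt_two_pow (hx j) (hx (j ^^^ 1 <<< i))

theorem pvGetD_lt (B : Nat) (M : List Nat) (h : ∀ v ∈ M, v < 2 ^ B) (k : Nat) :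
    M.getD k 0 < 2 ^ B := by
  rcases Nat.lt_or_ge k M.length with hk | hk
  · rw [List.getD_eq_getElem _ _ hk]
    exact h _ (List.getElem_mem hk)
  · rw [List.getD_eq_default _ _ hk]
    exact Nat.two_pow_pos B

theorem pvAN_lt (sbox : List Int) (n : Nat) : ∀ v ∈ pvAN sbox n, v < 2 ^ n := by
  refine pvNatXform_lt n (2 ^ n) n _ ?_
  intro v hv
  obtain ⟨x, _, hx⟩ := List.mem_map.mp hv
  rw [← hx]
  exact pvPack_lt n _

-- running-max facts
theorem pvFoldlMax_le {β : Type} (xs : List β) (f : β → Int) (c : Int) :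
    ∀ init : Int, init ≤ c → (∀ x ∈ xs, f x ≤ c) →
    xs.foldl (fun a x => max a (f x)) init ≤ c := by
  induction xs with
  | nil => intro init h0 _; exact h0
  | cons x t ih =>
      intro init h0 h
      exact ih _ (max_le h0 (h x (by simp))) (fun y hy => h y (by simp [hy]))

theorem pvFoldlMax_attain {β : Type} (xs : List β) (f : β → Int) :
    ∀ init : Int, xs.foldl (fun a x => max a (f x)) init = init ∨
      ∃ x ∈ xs, xs.foldl (fun a x => max a (f x)) init = f x := by
  induction xs with
  | nil => intro init; exact Or.inl rfl
  | cons x t ih =>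
      intro init
      rcases ih (max init (f x)) with h | h
      · rcases max_cases init (f x) with ⟨he, _⟩ | ⟨he, _⟩
        · exact Or.inl (by rw [List.foldl_cons, h, he])
        · exact Or.inr ⟨x, by simp, by rw [List.foldl_cons, h, he]⟩
      · obtain ⟨y, hy, he⟩ := h
        exact Or.inr ⟨y, by simp [hy], he⟩

theorem pvMaxD_nonneg (xs : List Int) (h : ∀ x ∈ xs, 0 ≤ x) :
    PySem.List.maxD xs (fun d => d) 0 = xs.foldl max 0 := by
  cases xs with
  | nil =>
      unfold PySem.List.maxD
      rw [(PySem.List.max?_eq_none_iff _ _).mpr rfl]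
      rfl
  | cons x t =>
      unfold PySem.List.maxD
      rw [PySem.List.max?_id_cons]
      rw [Option.getD_some, List.foldl_cons, max_eq_right (h x (by simp))]

theorem pvSumBits (n : Nat) : ∀ k : Nat, k < 2 ^ n →
    ((List.range n).map (fun i => ((k >>> i) &&& 1 : Nat))).sum = PySem.Int.bitCount (k : Int) := by
  induction n with
  | zero =>
      intro k hk
      have : k = 0 := by omega
      subst this
      simp
  | succ n ih =>
      intro k hk
      rcases Nat.eq_zero_or_pos k with h0 | h0
      · subst h0
        simp
      · rw [List.range_succ_eq_map, List.map_cons, List.map_map, List.sum_cons]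
        have h1 : ((List.range n).map ((fun i => ((k >>> i) &&& 1 : Nat)) ∘ Nat.succ)).sum
            = ((List.range n).map (fun i => (((k / 2) >>> i) &&& 1 : Nat))).sum := by
          congr 1
          refine List.map_congr_left ?_
          intro i _
          show (k >>> (i+1)) &&& 1 = ((k/2) >>> i) &&& 1
          rw [Nat.shiftRight_succ_inside]
        rw [h1, ih (k / 2) (by omega)]
        rw [PySem.Int.bitCount_natCast h0]
        rw [Nat.shiftRight_zero, Nat.and_one_is_mod]

theorem pvIfMax (d w : Int) : (if w > d then w else d) = max d w := by
  rcases max_cases d w with ⟨he, hc⟩ | ⟨he, hc⟩ <;> rw [he] <;> split <;> omega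

theorem pvHw_nonneg (k : Nat) : 0 ≤ pvHw k := by
  unfold pvHw
  positivity

theorem pvBandOneCast (m : Nat) : PySem.Int.band ((m : Nat) : Int) 1 = ((m &&& 1 : Nat) : Int) := by
  rw [show ((1 : Int) = ((1 : Nat) : Int)) from rfl, PySem.Int.band_natCast]

theorem pvBandShiftNat (k i : Nat) :
    PySem.Int.band (((k : Nat) : Int) >>> ((((((i : Nat) : Int)).toNat : Nat)) : Int)) 1 = (((k >>> i) &&& 1 : Nat) : Int) := by
  rw [Int.toNat_natCast, Int.shiftRight_natCast, pvBandOneCast]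

theorem pvB_eq (sbox : List Int) (n : Nat) :
    algebraic_degree_sbox_alt sbox ((n : Nat) : Int) =
      (List.range (2 ^ n)).foldl
        (fun d k => if (pvAN sbox n).getD k 0 ≠ 0 then max d (pvHw k) else d) 0 := by
  unfold algebraic_degree_sbox_alt
  simp only [Int.toNat_natCast, Nat.one_shiftLeft]
  have hinit : (PySem.List.pyRange 0 ((2 ^ n : Nat) : Int) 1).map
      (fun x => PySem.Int.band (PySem.List.pyGetD sbox x 0) (((2 ^ n : Nat) : Int) - 1))
      = (pvP sbox n).map (fun v : Nat => (v : Int)) := by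
    rw [PySem.List.pyRange_zero_natCast, List.map_map]
    unfold pvP
    rw [List.map_map]
    refine List.map_congr_left ?_
    intro x _
    show PySem.Int.band (PySem.List.pyGetD sbox ((x : Nat) : Int) 0) _ = _
    rw [PySem.List.pyGetD_natCast]
    have hm : (((2 ^ n : Nat) : Int) - 1) = ((2 : Int) ^ n - 1) := by push_cast; ring
    rw [hm, pvPack_cast]
    rfl
  rw [hinit, pvButterfly_natCast]
  simp only [PySem.List.pyRange_zero_natCast, List.foldl_map, List.map_map]
  refine PySem.List.foldl_congr_mem _ _ _ _ ?_
  intro acc k hk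
  have hk' : k < 2 ^ n := List.mem_range.mp hk
  have hw : ((List.range n).map ((fun i => PySem.Int.band (((k : Nat) : Int) >>> i.toNat) 1) ∘ (fun i : Nat => (i : Int)))).sum = pvHw k := by
    have h1 : ((List.range n).map ((fun i => PySem.Int.band (((k : Nat) : Int) >>> i.toNat) 1) ∘ (fun i : Nat => (i : Int)))).sum
        = ((List.range n).map (fun i : Nat => (((k >>> i) &&& 1 : Nat) : Int))).sum := by
      congr 1
      refine List.map_congr_left ?_
      intro i _
      simp only [Function.comp_apply]
      exact pvBandShiftNat k i
    rw [h1]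
    have h2 : ((List.range n).map (fun i : Nat => (((k >>> i) &&& 1 : Nat) : Int))).sum
        = ((((List.range n).map (fun i => ((k >>> i) &&& 1 : Nat))).sum : Nat) : Int) := by
      rw [Nat.cast_list_sum, List.map_map]
      rfl
    rw [h2, pvSumBits n k hk']
    rfl
  rw [pvGetDCast, pvIfMax, hw]
  simp only [ne_eq, Int.natCast_eq_zero]
  rfl

theorem pvBeqOneCast (x : Nat) : ((((x : Nat) : Int)) == (1 : Int)) = (x == 1) := by
  rcases h : (x == 1) with _ | _
  · simp only [beq_eq_false_iff_ne] at h ⊢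
    exact_mod_cast h
  · simp only [beq_iff_eq] at h ⊢
    exact_mod_cast h

theorem pvGetDmapExtract (p : Nat) (M : List Nat) (k : Nat) :
    (M.map (pvExtract p)).getD k 0 = pvExtract p (M.getD k 0) := by
  conv_lhs => rw [← pvExtract_zero p]
  rw [List.getD_map]

theorem pvA_eq (sbox : List Int) (n : Nat) :
    algebraic_degree_sbox sbox ((n : Nat) : Int) =
      (List.range n).foldl (fun md b => max md
        (((List.range (2 ^ n)).filter
            (fun k => pvExtract (n - 1 - b) ((pvAN sbox n).getD k 0) == 1)).foldl
          (fun a k => max a (pvHw k)) 0)) 0 := by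
  unfold algebraic_degree_sbox sbox_to_component_truth_tables
  simp only [Int.toNat_natCast, Nat.one_shiftLeft]
  rw [PySem.List.foldl_append_singleton_eq_map, List.nil_append]
  simp only [PySem.List.pyRange_zero_natCast, List.foldl_map, List.map_map]
  refine PySem.List.foldl_congr_mem _ _ _ _ ?_
  intro md b hb
  have hbn : b < n := List.mem_range.mp hb
  have hp : n - 1 - b < n := by omega
  congr 1
  simp only [Function.comp_apply]
  have hcomp : (List.range (2 ^ n)).map
      ((fun x => PySem.Int.band (PySem.List.pyGetD sbox x 0 >>> ((n : Int) - 1 - ((b : Nat) : Int)).toNat) 1) ∘ (fun k : Nat => (k : Int)))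
      = ((pvP sbox n).map (pvExtract (n - 1 - b))).map (fun v : Nat => (v : Int)) := by
    unfold pvP
    simp only [List.map_map]
    refine List.map_congr_left ?_
    intro x _
    simp only [Function.comp_apply]
    rw [PySem.List.pyGetD_natCast]
    have he : ((n : Int) - 1 - ((b : Nat) : Int)).toNat = n - 1 - b := by omega
    rw [he]
    exact pvBand_shift_one (sbox.getD x 0) (n - 1 - b) n hp
  rw [hcomp]
  unfold mobius_transform
  simp only [Int.toNat_natCast, Nat.one_shiftLeft]
  rw [pvButterfly_natCast, pvNatXform_map n (2 ^ n) _ (pvExtract_xor (n - 1 - b))]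
  rw [List.filter_map]
  have hfil : List.filter ((fun k => PySem.List.pyGetD
        (((pvNatXform n (2 ^ n) (pvP sbox n)).map (pvExtract (n - 1 - b))).map (fun v : Nat => (v : Int))) k 0 == 1)
        ∘ (fun k : Nat => (k : Int))) (List.range (2 ^ n))
      = List.filter (fun k => pvExtract (n - 1 - b) ((pvAN sbox n).getD k 0) == 1) (List.range (2 ^ n)) := by
    refine List.filter_congr ?_
    intro k _
    simp only [Function.comp_apply]
    rw [pvGetDCast, pvGetDmapExtract, pvBeqOneCast]
    rfl
  rw [hfil, List.map_map]
  have hmap : List.map ((fun k => calc_hamming_weight k) ∘ (fun k : Nat => (k : Int)))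
        (List.filter (fun k => pvExtract (n - 1 - b) ((pvAN sbox n).getD k 0) == 1) (List.range (2 ^ n)))
      = List.map pvHw
        (List.filter (fun k => pvExtract (n - 1 - b) ((pvAN sbox n).getD k 0) == 1) (List.range (2 ^ n))) := by
    refine List.map_congr_left ?_
    intro k _
    exact calc_hamming_weight_natCast k
  rw [hmap]
  rw [pvMaxD_nonneg _ ?_]
  · rw [List.foldl_map]
  · intro x hx
    obtain ⟨k, _, hk⟩ := List.mem_map.mp hx
    rw [← hk]
    exact pvHw_nonneg k

theorem pvMaxEq (n : Nat) (AN : List Nat) (hlt : ∀ v ∈ AN, v < 2 ^ n) :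
    (List.range n).foldl (fun md b => max md
        (((List.range (2 ^ n)).filter
            (fun k => pvExtract (n - 1 - b) (AN.getD k 0) == 1)).foldl
          (fun a k => max a (pvHw k)) 0)) 0
    = (List.range (2 ^ n)).foldl
        (fun d k => if AN.getD k 0 ≠ 0 then max d (pvHw k) else d) 0 := by
  have hg : ∀ k, AN.getD k 0 < 2 ^ n := pvGetD_lt n AN hlt
  rw [PySem.List.foldl_ite_eq_foldl_filter (fun k => AN.getD k 0 ≠ 0)
    (fun d k => max d (pvHw k)) (List.range (2 ^ n)) 0]
  set F : Nat → Int := fun b =>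
    ((List.range (2 ^ n)).filter (fun k => pvExtract (n - 1 - b) (AN.getD k 0) == 1)).foldl
      (fun a k => max a (pvHw k)) 0 with hF
  have hmemB : ∀ k, k ∈ (List.range (2 ^ n)).filter (fun k => decide (AN.getD k 0 ≠ 0)) ↔
      k < 2 ^ n ∧ AN.getD k 0 ≠ 0 := by
    intro k
    rw [List.mem_filter, List.mem_range]
    simp
  have hmemb : ∀ b k, k ∈ (List.range (2 ^ n)).filter
      (fun k => pvExtract (n - 1 - b) (AN.getD k 0) == 1) ↔
      k < 2 ^ n ∧ (AN.getD k 0).testBit (n - 1 - b) = true := by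
    intro b k
    rw [List.mem_filter, List.mem_range, beq_iff_eq, pvExtract_eq_one_iff]
  apply le_antisymm
  · refine pvFoldlMax_le (List.range n) F _ 0 ?_ ?_
    · exact (PySem.List.le_foldl_max_int _ _ 0).1
    · intro b _
      rcases pvFoldlMax_attain ((List.range (2 ^ n)).filter
          (fun k => pvExtract (n - 1 - b) (AN.getD k 0) == 1)) pvHw 0 with h | ⟨k, hk, he⟩
      · rw [hF]
        simp only []
        rw [h]
        exact (PySem.List.le_foldl_max_int _ _ 0).1
      · rw [hF]
        simp only []
        rw [he]
        obtain ⟨hk1, hk2⟩ := (hmemb b k).mp hk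
        have hne : AN.getD k 0 ≠ 0 := by
          intro h0
          rw [h0, Nat.zero_testBit] at hk2
          exact Bool.false_ne_true hk2
        exact (PySem.List.le_foldl_max_int _ _ 0).2 k ((hmemB k).mpr ⟨hk1, hne⟩)
  · refine pvFoldlMax_le _ pvHw _ 0 ?_ ?_
    · exact (PySem.List.le_foldl_max_int _ _ 0).1
    · intro k hk
      obtain ⟨hk1, hk2⟩ := (hmemB k).mp hk
      obtain ⟨i, hi1, hi2⟩ := Nat.exists_most_significant_bit hk2
      have hin : i < n := by
        by_contra hge
        have : AN.getD k 0 < 2 ^ i :=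
          lt_of_lt_of_le (hg k) (Nat.pow_le_pow_right (by omega) (by omega))
        rw [Nat.testBit_lt_two_pow this] at hi1
        exact Bool.false_ne_true hi1
      have hb : n - 1 - i ∈ List.range n := List.mem_range.mpr (by omega)
      have hidx : n - 1 - (n - 1 - i) = i := by omega
      have h1 : pvHw k ≤ F (n - 1 - i) := by
        rw [hF]
        simp only []
        refine (PySem.List.le_foldl_max_int _ _ 0).2 k ?_
        rw [hmemb]
        rw [hidx]
        exact ⟨hk1, hi1⟩
      have h2 : F (n - 1 - i) ≤ (List.range n).foldl (fun md b => max md (F b)) 0 :=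
        (PySem.List.le_foldl_max_int _ F 0).2 _ hb
      exact le_trans h1 h2


-- ===== VERDICT (by name: the statement is the Claim_ definition above) =====
theorem algebraic_degree_sbox_spec : Claim_equal_algebraic_degree_sbox := by
  intro sbox n_bits hdom hpre
  unfold Spec_algebraic_degree_sbox
  obtain ⟨hn0, _⟩ := hpre
  obtain ⟨n, rfl⟩ : ∃ n : Nat, n_bits = ((n : Nat) : Int) :=
    ⟨n_bits.toNat, (Int.toNat_of_nonneg hn0).symm⟩
  rw [pvA_eq, pvB_eq]
  exact pvMaxEq n (pvAN sbox n) (pvAN_lt sbox n)
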